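-- pv_equiv track=rewrite | github.com/Aldgamir/-2_- | Шифр перестановки-Рівень 1.py | create_permutation_key
-- ===== SOURCE A (Python) =====
-- def create_permutation_key(phrase):
--     # Отримуємо унікальні символи фрази та сортуємо їх за алфавітом
--     sorted_phrase = sorted(list(phrase))
--     key_map = {}
--
--     # Створюємо словник, який відповідає кожному символу його позиції в відсортованій фразі
--     for i, char in enumerate(sorted_phrase):
--         if char not in key_map:
--             key_map[char] = []
--         key_map[char].append(i + 1)
--
--     # Формуємо ключ перестановки
--     permutation_key = []
--     for char in phrase:
--         permutation_key.append(key_map[char].pop(0))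
--
--     return permutation_key
-- ===== SOURCE B (Python) =====
-- def create_permutation_key(phrase):
--     # Rank formula: rank of phrase[i] = (# chars smaller anywhere) + (# equal chars at or before i).
--     key = []
--     for i, ch in enumerate(phrase):
--         smaller = sum(1 for c in phrase if c < ch)
--         earlier = sum(1 for c in phrase[:i + 1] if c == ch)
--         key.append(smaller + earlier)
--     return key
-- ===== Notes on version B (the rewrite author's own statement) =====
-- stated objective: alternative
-- what changed: Replaces A's sort-the-copy + dict-of-FIFO-position-queues replay (sorted list, grouping dict, pop(0) per character) by a direct counting formula with no sort and no dict: rank of phrase[i] = (# characters smaller than it anywhere) + (# equal characters at index <= i).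
import Mathlib
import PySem

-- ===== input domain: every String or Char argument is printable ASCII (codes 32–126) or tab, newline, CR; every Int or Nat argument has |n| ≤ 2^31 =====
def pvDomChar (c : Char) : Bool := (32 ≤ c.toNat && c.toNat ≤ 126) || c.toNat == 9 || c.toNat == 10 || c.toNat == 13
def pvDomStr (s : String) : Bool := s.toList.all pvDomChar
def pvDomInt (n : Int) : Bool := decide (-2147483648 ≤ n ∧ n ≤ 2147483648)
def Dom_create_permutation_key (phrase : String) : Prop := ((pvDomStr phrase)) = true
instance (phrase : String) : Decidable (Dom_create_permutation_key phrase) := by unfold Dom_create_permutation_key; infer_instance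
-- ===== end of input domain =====

-- B replaces A's sorted-copy + dict-of-FIFO-queues replay by a direct counting formula
-- (rank = #smaller chars + #equal chars up to here); objective: alternative (no dict, no sort).

-- ===== PORT A =====
-- sorted(list(phrase)); then key_map[char] = list of 1-based positions of char in the sorted copy
-- (built with dict-get-or-default + append = Dict.modify); then replay phrase popping the front of
-- each queue.  The '.headD 0 / .tail' pair ports 'key_map[char].pop(0)'; the default 0 is
-- unreachable (every char of phrase has a non-empty queue, Python never raises here).
def create_permutation_key (phrase : String) : List Int :=
  let sorted_phrase := PySem.List.sorted phrase.toList (fun c => c)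
  let key_map : PySem.Dict Char (List Int) :=
    (PySem.List.enumerate sorted_phrase).foldl
      (fun d p => d.modify p.2 [] (fun l => l ++ [p.1 + 1])) PySem.Dict.empty
  (phrase.toList.foldl
      (fun s ch =>
        let q := s.1.getD ch []
        (s.1.insert ch q.tail, s.2 ++ [q.headD 0]))
      (key_map, ([] : List Int))).2

-- ===== PORT B =====
-- rank of phrase[i] = (# chars of phrase smaller than it) + (# equal chars at index ≤ i);
-- the two generator sums are countP / count, phrase[:i+1] is take (i+1) (i ≥ 0 from enumerate).
def create_permutation_key_alt (phrase : String) : List Int :=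
  let cs := phrase.toList
  (PySem.List.enumerate cs).foldl
    (fun key p =>
      key ++ [((cs.countP (fun c => decide (c < p.2)) : Int))
              + (((cs.take (p.1 + 1).toNat).count p.2 : Int))]) []

-- ===== PRECONDITION & SPEC =====
def Spec_create_permutation_key (phrase : String) (out : List Int) : Prop := out = create_permutation_key_alt phrase
instance (phrase : String) (out : List Int) : Decidable (Spec_create_permutation_key phrase out) := by unfold Spec_create_permutation_key; infer_instance

-- ===== CLAIM (what is proved, stated in full; the proofs are below) =====
def Claim_equal_create_permutation_key : Prop := ∀ (phrase : String), Dom_create_permutation_key phrase → Spec_create_permutation_key phrase (create_permutation_key phrase)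

-- ===== LEMMAS AND PROOFS =====

/-- The arithmetic progression a, a+1, …, a+n-1 (the queue A stores for one character). -/
def qIota : Int → Nat → List Int
  | _, 0 => []
  | a, n + 1 => a :: qIota (a + 1) n

theorem qIota_zero (a : Int) : qIota a 0 = [] := rfl

theorem qIota_succ (a : Int) (n : Nat) : qIota a (n + 1) = a :: qIota (a + 1) n := rfl

/-- In a weakly increasing list, the (1-based) positions of `c`, read off with `enumerate`
starting at `k`, form the progression starting right after all smaller elements. -/
theorem sortedIdx (c : Char) : ∀ (l : List Char) (k : Int), l.Pairwise (· ≤ ·) →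
    ((PySem.List.enumerate l k).filter (fun p => p.2 == c)).map (fun p => p.1 + 1)
      = qIota (k + (l.countP (fun x => decide (x < c)) : Int) + 1) (l.count c) := by
  intro l
  induction l with
  | nil => intro k _; simp [PySem.List.enumerate, qIota]
  | cons x t ih =>
    intro k h
    obtain ⟨hx, ht⟩ := List.pairwise_cons.mp h
    have henum : PySem.List.enumerate (x :: t) k = (k, x) :: PySem.List.enumerate t (k + 1) := rfl
    by_cases hxc : x = c
    · subst hxc
      have hcp0 : t.countP (fun y => decide (y < x)) = 0 :=
        List.countP_eq_zero.mpr (fun y hy => by simpa using not_lt.mpr (hx y hy))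
      have hcpx : (x :: t).countP (fun y => decide (y < x)) = 0 := by
        simp [hcp0]
      rw [henum, List.filter_cons_of_pos (by simp), List.map_cons, ih (k + 1) ht,
        hcp0, hcpx, List.count_cons_self, qIota_succ]
      congr 1
      · push_cast; ring
      · congr 1; push_cast; ring
    · have hbeq : ((x : Char) == c) = false := by simp [hxc]
      by_cases hlt : x < c
      · rw [henum, List.filter_cons_of_neg (by simp [hbeq]), ih (k + 1) ht,
          List.countP_cons, List.count_cons]
        simp only [hbeq, Bool.false_eq_true, if_false,
          show (decide (x < c) = true) from by simp [hlt], if_true]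
        congr 1
        push_cast; ring
      · have hgt : c < x := lt_of_le_of_ne (not_lt.mp hlt) (Ne.symm hxc)
        have hct : t.count c = 0 :=
          List.count_eq_zero.mpr (fun hc => absurd (hx c hc) (not_le.mpr hgt))
        have hcp0 : t.countP (fun y => decide (y < c)) = 0 :=
          List.countP_eq_zero.mpr
            (fun y hy => by simpa using not_lt.mpr (le_of_lt (lt_of_lt_of_le hgt (hx y hy))))
        rw [henum, List.filter_cons_of_neg (by simp [hbeq]), ih (k + 1) ht,
          List.countP_cons, List.count_cons, hct, hcp0]
        simp [hbeq, show (decide (x < c) = false) from by simp [hlt], qIota_zero]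

/-- What A's first loop leaves in the dict: for every character `c`, the queue of 1-based
positions of `c` in the sorted copy, i.e. the progression after `countP (< c)`. -/
theorem km_getD (cs : List Char) (c : Char) :
    ((PySem.List.enumerate (PySem.List.sorted cs (fun x => x))).foldl
        (fun d p => d.modify p.2 [] (fun l => l ++ [p.1 + 1]))
        (PySem.Dict.empty : PySem.Dict Char (List Int))).getD c []
      = qIota ((cs.countP (fun x => decide (x < c)) : Int) + 1) (cs.count c) := by
  have hperm := PySem.List.sorted_perm cs (fun x => x) false
  have h1 :
      (PySem.List.enumerate (PySem.List.sorted cs (fun x => x))).foldl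
        (fun d p => d.modify p.2 [] (fun l => l ++ [p.1 + 1]))
        (PySem.Dict.empty : PySem.Dict Char (List Int))
      = ((PySem.List.enumerate (PySem.List.sorted cs (fun x => x))).map
          (fun p => (p.2, p.1 + 1))).foldl
          (fun d q => d.modify q.1 [] (fun l => l ++ [q.2])) PySem.Dict.empty := by
    rw [List.foldl_map]
  rw [h1, PySem.Dict.getD_foldl_modify_append, List.filter_map, List.map_map]
  simp only [Function.comp_def]
  have h2 := sortedIdx c (PySem.List.sorted cs (fun x => x)) 0
    (PySem.List.sorted_pairwise cs (fun x => x))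
  rw [h2, hperm.countP_eq, hperm.count_eq]
  simp [PySem.Dict.getD_empty]

/-- Invariant of A's replay loop: with the queues holding exactly the not-yet-popped
positions, the loop appends B's counting formula for each remaining character. -/
theorem loop_out (cs : List Char) :
    ∀ (rest pre : List Char) (d : PySem.Dict Char (List Int)) (out : List Int),
    cs = pre ++ rest →
    (∀ c, d.getD c [] = qIota ((cs.countP (fun x => decide (x < c)) : Int) + 1 + (pre.count c : Int))
        (cs.count c - pre.count c)) →
    (rest.foldl
        (fun s ch =>
          let q := s.1.getD ch []
          (s.1.insert ch q.tail, s.2 ++ [q.headD 0]))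
        (d, out)).2
      = out ++ (PySem.List.enumerate rest (pre.length : Int)).map
          (fun p => ((cs.countP (fun c => decide (c < p.2)) : Int))
              + (((cs.take (p.1 + 1).toNat).count p.2 : Int))) := by
  intro rest
  induction rest with
  | nil => intro pre d out _ _; simp [PySem.List.enumerate]
  | cons ch rest' ih =>
    intro pre d out hsplit hinv
    have hcount : cs.count ch = pre.count ch + rest'.count ch + 1 := by
      rw [hsplit, List.count_append, List.count_cons_self]; omega
    have hq := hinv ch
    rw [show cs.count ch - pre.count ch = rest'.count ch + 1 from by omega, qIota_succ] at hq
    have hsplit' : cs = (pre ++ [ch]) ++ rest' := by simpa using hsplit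
    have hinv' : ∀ c,
        ((d.insert ch (qIota ((cs.countP (fun x => decide (x < ch)) : Int) + 1
            + (pre.count ch : Int) + 1) (rest'.count ch))).getD c [])
          = qIota ((cs.countP (fun x => decide (x < c)) : Int) + 1 + ((pre ++ [ch]).count c : Int))
              (cs.count c - (pre ++ [ch]).count c) := by
      intro c
      rw [PySem.Dict.getD_insert]
      by_cases hc : c = ch
      · subst hc
        have h1 : (pre ++ [c]).count c = pre.count c + 1 := by simp
        rw [if_pos rfl, h1, show cs.count c - (pre.count c + 1) = rest'.count c from by omega]
        congr 1
      · have h1 : (pre ++ [ch]).count c = pre.count c := by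
          simp [List.count_append, Ne.symm hc]
        rw [if_neg hc, hinv c, h1]
    have hrec := ih (pre ++ [ch]) _
      (out ++ [(cs.countP (fun x => decide (x < ch)) : Int) + 1 + (pre.count ch : Int)])
      hsplit' hinv'
    have htn : (((pre.length : Int)) + 1).toNat = pre.length + 1 := by omega
    have htake : cs.take (pre.length + 1) = pre ++ [ch] := by
      rw [hsplit, show pre ++ ch :: rest' = pre ++ [ch] ++ rest' by simp]
      exact List.take_left' (by simp)
    simp only [List.foldl_cons, hq, List.headD_cons, List.tail_cons] at *
    rw [hrec]
    have henum : PySem.List.enumerate (ch :: rest') (pre.length : Int)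
        = ((pre.length : Int), ch) :: PySem.List.enumerate rest' ((pre.length : Int) + 1) := rfl
    rw [henum, List.map_cons]
    simp only [htn, htake, List.count_append, List.count_cons_self, List.count_nil,
      List.length_append, List.length_singleton, List.append_assoc, List.singleton_append]
    congr 2
    all_goals push_cast; ring_nf

-- ===== VERDICT (by name: the statement is the Claim_ definition above) =====
theorem create_permutation_key_spec : Claim_equal_create_permutation_key := by
  intro phrase _
  unfold Spec_create_permutation_key create_permutation_key create_permutation_key_alt
  rw [PySem.List.foldl_append_singleton_eq_map]
  have hinv0 : ∀ c,
      (((PySem.List.enumerate (PySem.List.sorted phrase.toList (fun x => x))).foldl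
          (fun d p => d.modify p.2 [] (fun l => l ++ [p.1 + 1]))
          (PySem.Dict.empty : PySem.Dict Char (List Int))).getD c [])
        = qIota ((phrase.toList.countP (fun x => decide (x < c)) : Int) + 1
            + (([] : List Char).count c : Int))
            (phrase.toList.count c - ([] : List Char).count c) := by
    intro c
    simpa using km_getD phrase.toList c
  have h := loop_out phrase.toList phrase.toList [] _ [] (by simp) hinv0
  simpa using h
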